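-- pv_equiv track=rewrite | github.com/Gipnotyin/Tinkoff_spring_2023 | Tinkoff Contest/Tinkoff Contest/4 задание/main.py | solve
-- ===== SOURCE A (Python) =====
-- from functools import cache
--
-- def solve(a: list[int], n: int) -> str:
--     @cache
--     def solve(s, i=0):
--         # если набрали сумму
--         if s == 0: return 0
--
--         # если перебрали
--         if s < 0: return -1
--
--         # если закончились монетки
--         if i >= len(a): return -1
--
--         # пробуем включить монету
--         x = solve(s - a[i], i + 1)
--         if x >= 0: return x | (1 << i)
--
--         # пробуем не включать монету
--         x = solve(s, i + 1)
--         if x >= 0: return x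
--
--         return -1
--
--     a *= 2  # удваиваем монеты
--     x = solve(n)
--     if x == -1: return "-1"
--     ans = [t for i, t in enumerate(a) if x & (1 << i)]  # в каком порядке выводить?
--     return f'{len(ans)}\n{" ".join(map(str, ans))}'
-- ===== SOURCE B (Python) =====
-- def solve(a, n):
--     # Two phases: boolean reachability (memoised) instead of bigint bitmask
--     # propagation, then an iterative include-first backtrack that collects the
--     # chosen coin values directly (no bit arithmetic at all).
--     coins = a + a  # doubled coins (A mutates its argument here; B does not)
--     m = len(coins)
--     memo = {}
--
--     def can(s, i):
--         if s == 0: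
--             return True
--         if s < 0 or i >= m:
--             return False
--         r = memo.get((s, i))
--         if r is None:
--             r = can(s - coins[i], i + 1) or can(s, i + 1)
--             memo[(s, i)] = r
--         return r
--
--     if not can(n, 0):
--         return "-1"
--     picks = []
--     s, i = n, 0
--     while s != 0:
--         if can(s - coins[i], i + 1):
--             picks.append(coins[i])
--             s -= coins[i]
--         i += 1
--     return f"{len(picks)}\n{' '.join(map(str, picks))}"
-- ===== Notes on version B (the rewrite author's own statement) =====
-- stated objective: alternative
-- what changed: A propagates a bigint bitmask of chosen indices through the recursion and decodes it with per-index bit tests over enumerate; B runs a plain boolean reachability recursion and then an iterative include-first backtrack that collects the chosen coin values directly, with no bit arithmetic.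
import Mathlib
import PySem

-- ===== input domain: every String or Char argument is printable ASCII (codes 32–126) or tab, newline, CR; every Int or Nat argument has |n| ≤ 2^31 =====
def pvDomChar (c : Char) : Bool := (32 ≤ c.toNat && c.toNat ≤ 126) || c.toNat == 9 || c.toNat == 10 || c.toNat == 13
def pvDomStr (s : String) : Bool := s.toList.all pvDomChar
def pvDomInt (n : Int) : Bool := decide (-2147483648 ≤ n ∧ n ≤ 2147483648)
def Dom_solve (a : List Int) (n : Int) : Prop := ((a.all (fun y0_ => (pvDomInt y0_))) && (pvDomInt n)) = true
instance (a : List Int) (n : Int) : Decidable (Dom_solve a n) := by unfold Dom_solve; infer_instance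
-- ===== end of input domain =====

-- B replaces A's bigint-bitmask recursion by a boolean reachability pass plus an
-- include-first backtrack collecting the chosen values; equivalence is about the
-- RETURN value only (Python A mutates its argument via `a *= 2`, B does not).

-- ===== PORT A =====
-- Python's `x | (1 << i)` / `x & (1 << i)`: Int carries no bitwise ops here, so they
-- are hand-ported through Nat; exact whenever x ≥ 0 and i ≥ 0, which holds at every
-- call site (x is a nonnegative mask, i a list index).
def pyOrBit (x : Int) (i : Nat) : Int := Int.ofNat (x.toNat ||| (1 <<< i))
def pyAndBit (x : Int) (i : Int) : Int := Int.ofNat (x.toNat &&& (1 <<< i.toNat))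

-- the inner cached `solve(s, i)`; memoisation does not change the value, so it is
-- ported as plain recursion.  `a[i]` is in range whenever read (i < len(a)), so
-- List.getD is exact there.
def solveRec (a : List Int) (s : Int) (i : Nat) : Int :=
  if s = 0 then 0
  else if s < 0 then -1
  else if h : a.length ≤ i then -1
  else
    let x := solveRec a (s - a.getD i 0) (i + 1)
    if 0 ≤ x then pyOrBit x i
    else
      let x := solveRec a s (i + 1)
      if 0 ≤ x then x else -1
termination_by a.length - i
decreasing_by all_goals exact Nat.sub_succ_lt_self _ _ (Nat.lt_of_not_le h)

def solve (a : List Int) (n : Int) : String :=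
  let a2 := a ++ a
  let x := solveRec a2 n 0
  if x = -1 then "-1"
  else
    let ans := ((PySem.List.enumerate a2).filter (fun p => pyAndBit x p.1 != 0)).map (·.2)
    PySem.Int.toStr (ans.length : Int) ++ "\n" ++ PySem.Str.join " " (ans.map PySem.Int.toStr)

-- ===== PORT B =====
-- Source B's memoised boolean `can(s, i)`; the memo table does not change the value.
def canRec (a : List Int) (s : Int) (i : Nat) : Bool :=
  if s = 0 then true
  else if s < 0 then false
  else if h : a.length ≤ i then false
  else canRec a (s - a.getD i 0) (i + 1) || canRec a s (i + 1)
termination_by a.length - i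
decreasing_by all_goals exact Nat.sub_succ_lt_self _ _ (Nat.lt_of_not_le h)

-- Source B's backtrack `while` loop as a tail recursion; the `a.length ≤ i` guard only
-- makes the recursion total (the loop never reaches it when `canRec` holds).
def backRec (a : List Int) (s : Int) (i : Nat) : List Int :=
  if s = 0 then []
  else if h : a.length ≤ i then []
  else if canRec a (s - a.getD i 0) (i + 1) then
    a.getD i 0 :: backRec a (s - a.getD i 0) (i + 1)
  else backRec a s (i + 1)
termination_by a.length - i
decreasing_by all_goals exact Nat.sub_succ_lt_self _ _ (Nat.lt_of_not_le h)

def solve_alt (a : List Int) (n : Int) : String :=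
  let coins := a ++ a
  if canRec coins n 0 then
    let picks := backRec coins n 0
    PySem.Int.toStr (picks.length : Int) ++ "\n" ++ PySem.Str.join " " (picks.map PySem.Int.toStr)
  else "-1"

-- ===== PRECONDITION & SPEC =====
def Spec_solve (a : List Int) (n : Int) (out : String) : Prop := out = solve_alt a n
instance (a : List Int) (n : Int) (out : String) : Decidable (Spec_solve a n out) := by unfold Spec_solve; infer_instance

-- ===== CLAIM (what is proved, stated in full; the proofs are below) =====
def Claim_equal_solve : Prop := ∀ (a : List Int) (n : Int), Dom_solve a n → Spec_solve a n (solve a n)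

-- ===== LEMMAS AND PROOFS =====

-- indices picked by the backtrack (proof-side mirror of backRec)
def backIdx (a : List Int) (s : Int) (i : Nat) : List Nat :=
  if s = 0 then []
  else if h : a.length ≤ i then []
  else if canRec a (s - a.getD i 0) (i + 1) then
    i :: backIdx a (s - a.getD i 0) (i + 1)
  else backIdx a s (i + 1)
termination_by a.length - i
decreasing_by all_goals exact Nat.sub_succ_lt_self _ _ (Nat.lt_of_not_le h)

-- the bitmask a sorted index list denotes, built exactly as solveRec builds it
def maskOf (J : List Nat) : Nat := J.foldr (fun j acc => acc ||| (1 <<< j)) 0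

theorem backRec_eq_map (a : List Int) : ∀ (k : Nat) (i : Nat) (s : Int), a.length - i ≤ k →
    backRec a s i = (backIdx a s i).map (fun j => a.getD j 0) := by
  intro k
  induction k with
  | zero =>
    intro i s hk
    rw [backRec, backIdx]
    split_ifs with h1 h2 h3 <;> simp_all <;> omega
  | succ k ih =>
    intro i s hk
    rw [backRec, backIdx]
    split_ifs with h1 h2 h3
    · rfl
    · rfl
    · simp only [List.map_cons]
      rw [ih (i + 1) (s - a.getD i 0) (by omega)]
    · exact ih (i + 1) s (by omega)

theorem testBit_maskOf (J : List Nat) (t : Nat) : (maskOf J).testBit t = decide (t ∈ J) := by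
  induction J with
  | nil => simp [maskOf]
  | cons j J ih =>
    simp only [maskOf, List.foldr_cons] at *
    rw [Nat.testBit_lor, ih, Nat.shiftLeft_eq, one_mul, Nat.testBit_two_pow]
    simp [List.mem_cons, eq_comm, Bool.or_comm]

theorem pyAndBit_maskOf (J : List Nat) (t : Int) :
    (pyAndBit (Int.ofNat (maskOf J)) t != 0) = decide (t.toNat ∈ J) := by
  have h : (maskOf J) &&& (1 <<< t.toNat) = ((maskOf J).testBit t.toNat).toNat * 2 ^ t.toNat := by
    rw [Nat.shiftLeft_eq, one_mul, Nat.and_two_pow]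
  rw [show pyAndBit (Int.ofNat (maskOf J)) t = Int.ofNat ((maskOf J) &&& (1 <<< t.toNat)) from rfl, h,
      testBit_maskOf]
  by_cases hm : t.toNat ∈ J <;> simp [hm]

-- the core invariant: where canRec fails, solveRec returns -1; where it holds,
-- solveRec returns exactly the mask of the backtrack's indices, which are
-- strictly increasing and lie in [i, a.length)
theorem solveRec_main (a : List Int) : ∀ (k : Nat) (i : Nat) (s : Int), a.length - i ≤ k →
    (canRec a s i = false → solveRec a s i = -1) ∧
    (canRec a s i = true →
      solveRec a s i = Int.ofNat (maskOf (backIdx a s i)) ∧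
      (∀ j ∈ backIdx a s i, i ≤ j ∧ j < a.length) ∧
      (backIdx a s i).Pairwise (· < ·)) := by
  intro k
  induction k with
  | zero =>
    intro i s hk
    rw [canRec, solveRec, backIdx]
    split_ifs with h1 h2 h3 <;> simp_all [maskOf] <;> omega
  | succ k ih =>
    intro i s hk
    rw [canRec, solveRec, backIdx]
    by_cases h1 : s = 0
    · simp [h1, maskOf]
    by_cases h2 : s < 0
    · simp [h1, h2]
    by_cases h3 : a.length ≤ i
    · simp [h1, h2, h3]
    · simp only [if_neg h1, if_neg h2, dif_neg h3]
      have ih1 := ih (i + 1) (s - a.getD i 0) (by omega)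
      have ih2 := ih (i + 1) s (by omega)
      cases hc1 : canRec a (s - a.getD i 0) (i + 1) with
      | true =>
        obtain ⟨hval, hbnd, hpw⟩ := ih1.2 hc1
        constructor
        · intro hfalse; simp at hfalse
        · intro _
          rw [hval]
          have hx : (0 : Int) ≤ Int.ofNat (maskOf (backIdx a (s - a.getD i 0) (i + 1))) := by
            exact Int.natCast_nonneg _
          rw [if_pos hx]
          refine ⟨rfl, ?_, ?_⟩
          · intro j hj
            rcases List.mem_cons.mp hj with h | h
            · omega
            · have := hbnd j h; omega
          · refine List.pairwise_cons.mpr ⟨?_, hpw⟩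
            intro j hj; have := hbnd j hj; omega
      | false =>
        have hneg1 := ih1.1 hc1
        rw [hneg1]
        have hlt : ¬ ((0:Int) ≤ -1) := by omega
        rw [if_neg hlt]
        cases hc2 : canRec a s (i + 1) with
        | true =>
          obtain ⟨hval, hbnd, hpw⟩ := ih2.2 hc2
          constructor
          · intro hfalse; simp at hfalse
          · intro _
            rw [hval]
            have hx : (0 : Int) ≤ Int.ofNat (maskOf (backIdx a s (i + 1))) :=
              Int.natCast_nonneg _
            rw [if_pos hx]
            simp only [Bool.false_eq_true, if_false]
            refine ⟨trivial, ?_, hpw⟩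
            intro j hj; have := hbnd j hj; omega
        | false =>
          have hneg2 := ih2.1 hc2
          rw [hneg2, if_neg hlt]
          constructor
          · intro _; rfl
          · intro htrue; simp at htrue

-- filtering `enumerate` by membership of the index in a sorted in-range list J
-- yields exactly the elements of the list at the positions of J
theorem filter_enumerate_mem (K : List Nat) :
    ∀ (l : List Int) (s : Nat) (J : List Nat),
    J.Pairwise (· < ·) → (∀ j ∈ J, s ≤ j ∧ j < s + l.length) →
    (∀ t, s ≤ t → (t ∈ K ↔ t ∈ J)) →
    ((PySem.List.enumerate l (s : Int)).filter (fun p => decide (p.1.toNat ∈ K))).map (·.2)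
      = J.map (fun j => l.getD (j - s) 0) := by
  intro l
  induction l with
  | nil =>
    intro s J hpw hbnd hK
    have : J = [] := by
      cases J with
      | nil => rfl
      | cons j J => exact absurd (hbnd j (List.mem_cons_self)) (by simp)
    simp [this, PySem.List.enumerate]
  | cons x xs ih =>
    intro s J hpw hbnd hK
    rw [PySem.List.enumerate_cons]
    have hcast : ((s : Int) + 1) = ((s + 1 : Nat) : Int) := by push_cast; ring
    cases J with
    | nil =>
      have hs : s ∉ K := fun h => by simpa using (hK s le_rfl).mp h
      rw [List.filter_cons, if_neg (by simp [hs])]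
      rw [hcast, ih (s + 1) [] (by simp) (by simp) (fun t ht => ⟨fun h => by simpa using (hK t (by omega)).mp h, by simp⟩)]
      simp
    | cons j J' =>
      have hsj : s ≤ j := (hbnd j (List.mem_cons_self)).1
      have hj' : ∀ j' ∈ J', j < j' := fun j' h => List.rel_of_pairwise_cons hpw h
      by_cases hej : j = s
      · subst hej
        have hsK : j ∈ K := (hK j le_rfl).mpr (List.mem_cons_self)
        rw [List.filter_cons, if_pos (by simp [hsK]), List.map_cons]
        rw [hcast, ih (j + 1) J' (List.Pairwise.of_cons hpw)
          (fun j' h => ⟨by have := hj' j' h; omega, by have := (hbnd j' (List.mem_cons_of_mem _ h)).2; simp at *; omega⟩)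
          (fun t ht => by
            rw [hK t (by omega)]
            simp only [List.mem_cons]
            constructor
            · rintro (rfl | h)
              · omega
              · exact h
            · exact Or.inr)]
        simp only [List.map_cons, Nat.sub_self, List.getD_cons_zero]
        refine List.cons_eq_cons.mpr ⟨rfl, ?_⟩
        apply List.map_congr_left
        intro j' h
        have h1 : j < j' := hj' j' h
        have : j' - j = (j' - (j + 1)) + 1 := by omega
        simp [this]
      · have hsJ : s ∉ (j :: J') := by
          simp only [List.mem_cons]
          rintro (rfl | h)
          · exact hej rfl
          · have := hj' s h; omega
        have hsK : s ∉ K := fun h => hsJ ((hK s le_rfl).mp h)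
        rw [List.filter_cons, if_neg (by simp [hsK])]
        rw [hcast, ih (s + 1) (j :: J') hpw
          (fun j' h => by
            have := hbnd j' h
            rcases List.mem_cons.mp h with rfl | hmem
            · constructor <;> [omega; (simp at this; omega)]
            · have := hj' j' hmem; constructor <;> [omega; (simp at *; omega)])
          (fun t ht => hK t (by omega))]
        apply List.map_congr_left
        intro j' h
        have h1 : s < j' := by
          rcases List.mem_cons.mp h with rfl | hmem
          · omega
          · have := hj' j' hmem; omega
        have : j' - s = (j' - (s + 1)) + 1 := by omega
        simp [this]

-- ===== VERDICT (by name: the statement is the Claim_ definition above) =====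
theorem solve_spec : Claim_equal_solve := by
  intro a n _
  unfold Spec_solve solve solve_alt
  cases hc : canRec (a ++ a) n 0 with
  | false =>
    have h := (solveRec_main (a ++ a) (a ++ a).length 0 n (by omega)).1 hc
    simp [h, hc]
  | true =>
    obtain ⟨hval, hbnd, hpw⟩ := (solveRec_main (a ++ a) (a ++ a).length 0 n (by omega)).2 hc
    have hne : ¬ (solveRec (a ++ a) n 0 = -1) := by
      rw [hval]; intro h
      have h0 : (0 : Int) ≤ Int.ofNat (maskOf (backIdx (a ++ a) n 0)) := Int.natCast_nonneg _
      omega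
    simp only [hc, if_true, if_neg hne]
    have hcond : (fun (p : Int × Int) => pyAndBit (solveRec (a ++ a) n 0) p.1 != 0)
        = (fun (p : Int × Int) => decide (p.1.toNat ∈ backIdx (a ++ a) n 0)) := by
      funext p; rw [hval]; exact pyAndBit_maskOf _ p.1
    rw [hcond]
    have hfilt := filter_enumerate_mem (backIdx (a ++ a) n 0) (a ++ a) 0 (backIdx (a ++ a) n 0) hpw
      (fun j hj => ⟨Nat.zero_le _, by have := (hbnd j hj).2; omega⟩)
      (fun t _ => Iff.rfl)
    rw [show PySem.List.enumerate (a ++ a) (0 : Int)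
          = PySem.List.enumerate (a ++ a) (((0 : Nat) : Int)) from rfl, hfilt,
        backRec_eq_map (a ++ a) (a ++ a).length 0 n (by omega)]
    simp
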